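-- pv_equiv track=rewrite | github.com/zmrdltl/problemSolving | programmers/코딩 기초 트레이닝/주사위 게임 3.py | solution
-- ===== SOURCE A (Python) =====
-- def solution(a, b, c, d):
--     dices = [a,b,c,d]
--     dices.sort()
--
--     frequency_dict = {}
--     for number in dices:
--         frequency_dict[number] = frequency_dict.get(number, 0) + 1
--     category_size = len(frequency_dict)
--     if category_size == 1:
--         return 1111*dices[0]
--     if category_size == 2:
--         p, q = 0,0
--         for key, value in frequency_dict.items():
--             if value == 3:
--                 p = key
--             elif value == 1:
--                 q = key
--             else:
--                 p = dices[0]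
--                 q = dices[2]
--                 return (p+q) * abs(p-q)
--         return (10*p+q)**2
--     if category_size == 3:
--         keys = [key for key, value in frequency_dict.items() if value != 2]
--         q, r = keys[0], keys[1]
--         return q * r
--
--     return dices[0]
-- ===== SOURCE B (Python) =====
-- def solution(a, b, c, d):
--     s0, s1, s2, s3 = sorted((a, b, c, d))
--     if s0 == s3:                      # four of a kind
--         return 1111 * s0
--     if s0 == s2:                      # triple is the low value
--         return (10 * s0 + s3) ** 2
--     if s1 == s3:                      # triple is the high value
--         return (10 * s1 + s0) ** 2
--     if s0 == s1 and s2 == s3:         # two pairs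
--         return (s0 + s2) * abs(s0 - s2)
--     if s0 == s1:                      # one pair (low)
--         return s2 * s3
--     if s1 == s2:                      # one pair (middle)
--         return s0 * s3
--     if s2 == s3:                      # one pair (high)
--         return s0 * s1
--     return s0                         # all distinct
-- ===== Notes on version B (the rewrite author's own statement) =====
-- stated objective: simpler
-- what changed: B sorts the four dice and classifies the pattern by direct positional equality comparisons on the sorted values, instead of building a frequency dictionary and scanning its items with inner loops.
import Mathlib
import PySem

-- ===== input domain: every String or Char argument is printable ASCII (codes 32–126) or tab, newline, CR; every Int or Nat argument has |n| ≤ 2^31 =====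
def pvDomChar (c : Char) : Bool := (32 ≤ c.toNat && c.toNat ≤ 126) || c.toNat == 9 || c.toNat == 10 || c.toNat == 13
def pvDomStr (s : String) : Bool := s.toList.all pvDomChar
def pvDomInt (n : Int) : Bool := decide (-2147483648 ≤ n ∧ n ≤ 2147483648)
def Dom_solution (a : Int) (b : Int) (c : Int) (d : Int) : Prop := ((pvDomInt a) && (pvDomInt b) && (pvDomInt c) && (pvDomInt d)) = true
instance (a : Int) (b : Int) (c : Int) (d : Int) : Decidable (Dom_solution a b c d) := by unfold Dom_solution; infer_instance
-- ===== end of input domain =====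

-- B replaces A's frequency-dictionary classification by direct positional
-- equality tests on the sorted dice (simpler; same result, proved below).


-- ===== PORT A =====
-- the 'for key, value in frequency_dict.items()' loop of the size-2 case,
-- with its early return on value == 2
def solGo2 (dices : List Int) (items : List (Int × Int)) (p q : Int) : Int :=
  match items with
  | [] => (10 * p + q) ^ 2
  | (key, value) :: rest =>
    if value = 3 then solGo2 dices rest key q
    else if value = 1 then solGo2 dices rest p key
    else
      let p := PySem.List.pyGetD dices 0 0
      let q := PySem.List.pyGetD dices 2 0
      (p + q) * |p - q|

-- everything after 'dices.sort()'
def solGo (dices : List Int) : Int :=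
  let freq : PySem.Dict Int Int :=
    dices.foldl (fun fd number => fd.insert number (fd.getD number 0 + 1)) PySem.Dict.empty
  let categorySize := freq.size
  if categorySize = 1 then 1111 * PySem.List.pyGetD dices 0 0
  else if categorySize = 2 then solGo2 dices freq.items 0 0
  else if categorySize = 3 then
    let keys := (freq.items.filter (fun kv => kv.2 ≠ 2)).map (·.1)
    let q := PySem.List.pyGetD keys 0 0
    let r := PySem.List.pyGetD keys 1 0
    q * r
  else PySem.List.pyGetD dices 0 0

def solution (a : Int) (b : Int) (c : Int) (d : Int) : Int :=
  solGo (PySem.List.sorted [a, b, c, d] (fun x => x) false)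

-- ===== PORT B =====
def solAltGo (s0 s1 s2 s3 : Int) : Int :=
  if s0 = s3 then 1111 * s0
  else if s0 = s2 then (10 * s0 + s3) ^ 2
  else if s1 = s3 then (10 * s1 + s0) ^ 2
  else if s0 = s1 ∧ s2 = s3 then (s0 + s2) * |s0 - s2|
  else if s0 = s1 then s2 * s3
  else if s1 = s2 then s0 * s3
  else if s2 = s3 then s0 * s1
  else s0

def solution_alt (a : Int) (b : Int) (c : Int) (d : Int) : Int :=
  match PySem.List.sorted [a, b, c, d] (fun x => x) false with
  | [s0, s1, s2, s3] => solAltGo s0 s1 s2 s3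
  | _ => 0

-- ===== PRECONDITION & SPEC =====
def Spec_solution (a : Int) (b : Int) (c : Int) (d : Int) (out : Int) : Prop := out = solution_alt a b c d
instance (a : Int) (b : Int) (c : Int) (d : Int) (out : Int) : Decidable (Spec_solution a b c d out) := by unfold Spec_solution; infer_instance

-- ===== CLAIM (what is proved, stated in full; the proofs are below) =====
def Claim_equal_solution : Prop := ∀ (a : Int) (b : Int) (c : Int) (d : Int), Dom_solution a b c d → Spec_solution a b c d (solution a b c d)

-- ===== LEMMAS AND PROOFS =====

-- the sorted list of four dice has exactly four elements, in order
lemma sorted_four_shape (a b c d : Int) :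
    ∃ x y z w, PySem.List.sorted [a, b, c, d] (fun v => v) false = [x, y, z, w] ∧
      x ≤ y ∧ y ≤ z ∧ z ≤ w := by
  have hperm := PySem.List.sorted_perm [a, b, c, d] (fun v : Int => v) false
  have hlen : (PySem.List.sorted [a, b, c, d] (fun v : Int => v) false).length = 4 :=
    hperm.length_eq
  rcases e : PySem.List.sorted [a, b, c, d] (fun v : Int => v) false with
      _ | ⟨x, _ | ⟨y, _ | ⟨z, _ | ⟨w, _ | _⟩⟩⟩⟩ <;> rw [e] at hlen <;> simp at hlen
  have m01 := PySem.List.sorted_id_getElem_mono (xs := [a,b,c,d]) (p := 0) (q := 1)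
      (by omega) (by rw [e]; simp)
  have m12 := PySem.List.sorted_id_getElem_mono (xs := [a,b,c,d]) (p := 1) (q := 2)
      (by omega) (by rw [e]; simp)
  have m23 := PySem.List.sorted_id_getElem_mono (xs := [a,b,c,d]) (p := 2) (q := 3)
      (by omega) (by rw [e]; simp)
  simp only [e, List.getElem_cons_zero, List.getElem_cons_succ] at m01 m12 m23
  exact ⟨x, y, z, w, rfl, m01, m12, m23⟩

-- core: on a sorted 4-list the two classifications agree
set_option maxHeartbeats 1000000 in
lemma solGo_eq_solAltGo (x y z w : Int) (hxy : x ≤ y) (hyz : y ≤ z) (hzw : z ≤ w) :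
    solGo [x, y, z, w] = solAltGo x y z w := by
  by_cases h1 : x = y <;> by_cases h2 : y = z <;> by_cases h3 : z = w
  · subst h1; subst h2; subst h3
    simp [solGo, solAltGo, List.foldl, PySem.Dict.insert, PySem.Dict.getD, PySem.Dict.get?, PySem.Dict.empty, PySem.Dict.size, PySem.List.pyGetD, beq_iff_eq]
  · subst h1; subst h2
    have nxw : ¬ x = w := by omega
    simp [solGo, solGo2, solAltGo, List.foldl, PySem.Dict.insert, PySem.Dict.getD, PySem.Dict.get?, PySem.Dict.empty, PySem.Dict.size, beq_iff_eq, nxw]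
  · subst h1; subst h3
    have nxz : ¬ x = z := by omega
    simp [solGo, solGo2, solAltGo, List.foldl, PySem.Dict.insert, PySem.Dict.getD, PySem.Dict.get?, PySem.Dict.empty, PySem.Dict.size, PySem.List.pyGetD, beq_iff_eq, nxz]
  · subst h1
    have nxz : ¬ x = z := by omega
    have nzw : ¬ z = w := by omega
    have nxw : ¬ x = w := by omega
    simp [solGo, solAltGo, List.foldl, PySem.Dict.insert, PySem.Dict.getD, PySem.Dict.get?, PySem.Dict.empty, PySem.Dict.size, PySem.List.pyGetD, beq_iff_eq, nxz, nzw, nxw]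
  · subst h2; subst h3
    have nxy : ¬ x = y := by omega
    simp [solGo, solGo2, solAltGo, List.foldl, PySem.Dict.insert, PySem.Dict.getD, PySem.Dict.get?, PySem.Dict.empty, PySem.Dict.size, beq_iff_eq, nxy]
  · subst h2
    have nxy : ¬ x = y := by omega
    have nyw : ¬ y = w := by omega
    have nxw : ¬ x = w := by omega
    simp [solGo, solAltGo, List.foldl, PySem.Dict.insert, PySem.Dict.getD, PySem.Dict.get?, PySem.Dict.empty, PySem.Dict.size, PySem.List.pyGetD, beq_iff_eq, nxy, nyw, nxw]
  · subst h3
    have nxy : ¬ x = y := by omega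
    have nyz : ¬ y = z := by omega
    have nxz : ¬ x = z := by omega
    simp [solGo, solAltGo, List.foldl, PySem.Dict.insert, PySem.Dict.getD, PySem.Dict.get?, PySem.Dict.empty, PySem.Dict.size, PySem.List.pyGetD, beq_iff_eq, nxy, nyz, nxz]
  ·
    have nxy : ¬ x = y := by omega
    have nyz : ¬ y = z := by omega
    have nzw : ¬ z = w := by omega
    have nxz : ¬ x = z := by omega
    have nxw : ¬ x = w := by omega
    have nyw : ¬ y = w := by omega
    simp [solGo, solAltGo, List.foldl, PySem.Dict.insert, PySem.Dict.getD, PySem.Dict.get?, PySem.Dict.empty, PySem.Dict.size, PySem.List.pyGetD, beq_iff_eq, nxy, nyz, nzw, nxz, nxw, nyw]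

-- ===== VERDICT (by name: the statement is the Claim_ definition above) =====
theorem solution_spec : Claim_equal_solution := by
  intro a b c d _
  unfold Spec_solution solution solution_alt
  obtain ⟨x, y, z, w, hs, hxy, hyz, hzw⟩ := sorted_four_shape a b c d
  rw [hs]
  exact solGo_eq_solAltGo x y z w hxy hyz hzw
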